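-- pv_equiv track=rewrite | github.com/chukwudibarrah/local-around | backend/app/services/xml_parser.py | find_bus_route
-- ===== SOURCE A (Python) =====
-- def find_bus_route(routes, start_location, end_location):
--     matching_routes = []
--     for route in routes:
--         start_index = next((i for i, r in enumerate(route) if r[0] == start_location), None)
--         if start_index is not None:
--             end_index = next((i for i in range(start_index, len(route)) if route[i][1] == end_location), None)
--             if end_index is not None:
--                 matching_routes.append(route[start_index:end_index+1])
--     return matching_routes
-- ===== SOURCE B (Python) =====
-- def find_bus_route(routes, start_location, end_location):
--     matching_routes = []
--     for route in routes:
--         segment = None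
--         for stop in route:
--             if segment is None:
--                 if stop[0] != start_location:
--                     continue
--                 segment = []
--             segment.append(stop)
--             if stop[1] == end_location:
--                 matching_routes.append(segment)
--                 break
--     return matching_routes
-- ===== Notes on version B (the rewrite author's own statement) =====
-- stated objective: alternative
-- what changed: Replaces A's index-based double scan (find start index, then scan indices for the end, then slice) with a single pass per route that builds the matching segment incrementally in a state variable, using no indices or slicing.
import Mathlib
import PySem

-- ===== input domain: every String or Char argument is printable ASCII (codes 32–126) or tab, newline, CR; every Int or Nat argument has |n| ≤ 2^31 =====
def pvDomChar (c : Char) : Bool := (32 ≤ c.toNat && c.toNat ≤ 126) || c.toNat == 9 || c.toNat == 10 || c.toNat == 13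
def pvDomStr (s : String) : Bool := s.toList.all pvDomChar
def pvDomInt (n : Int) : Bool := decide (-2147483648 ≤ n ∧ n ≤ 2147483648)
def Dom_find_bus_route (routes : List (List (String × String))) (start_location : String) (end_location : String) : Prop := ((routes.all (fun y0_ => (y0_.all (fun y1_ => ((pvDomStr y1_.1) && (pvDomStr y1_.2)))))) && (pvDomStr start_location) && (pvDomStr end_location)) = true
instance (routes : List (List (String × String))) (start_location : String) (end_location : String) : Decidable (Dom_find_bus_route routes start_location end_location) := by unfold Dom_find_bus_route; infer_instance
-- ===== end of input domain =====

-- B replaces A's index-based double scan plus slicing by a single pass per route that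
-- builds the matching segment incrementally; same behaviour, no speed claim.

-- ===== PORT A =====
-- next((i for i in range(start_index, len(route)) if route[i][1] == end_location), None)
def aFindEnd (route : List (String × String)) (end_location : String) (i : Nat) : Option Nat :=
  if h : i < route.length then
    if (route[i]).2 == end_location then some i else aFindEnd route end_location (i+1)
  else none
termination_by route.length - i

-- body of A's `for route in routes` loop for one route: the appended segment, if any
def aRoute (route : List (String × String)) (start_location end_location : String) :
    Option (List (String × String)) :=
  match List.findIdx? (fun r => r.1 == start_location) route with
  | none => none
  | some start_index =>
    match aFindEnd route end_location start_index with
    | none => none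
    | some end_index =>
        some (PySem.List.slice route (some (start_index : Int)) (some ((end_index : Int) + 1)))

def find_bus_route (routes : List (List (String × String))) (start_location : String) (end_location : String) : List (List (String × String)) :=
  routes.foldl (fun matching_routes route =>
    match aRoute route start_location end_location with
    | some seg => matching_routes ++ [seg]
    | none => matching_routes) []

-- ===== PORT B =====
-- inner loop of B once `segment` has been started
def bCollect (end_location : String) (segment : List (String × String)) :
    List (String × String) → Option (List (String × String))
  | [] => none
  | stop :: rest =>
      let segment' := segment ++ [stop]
      if stop.2 == end_location then some segment' else bCollect end_location segment' rest

-- inner loop of B while `segment is None`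
def bSeek (start_location end_location : String) :
    List (String × String) → Option (List (String × String))
  | [] => none
  | stop :: rest =>
      if stop.1 == start_location then
        let segment' := [stop]
        if stop.2 == end_location then some segment' else bCollect end_location segment' rest
      else bSeek start_location end_location rest

def find_bus_route_alt (routes : List (List (String × String))) (start_location : String) (end_location : String) : List (List (String × String)) :=
  routes.foldl (fun matching_routes route =>
    match bSeek start_location end_location route with
    | some seg => matching_routes ++ [seg]
    | none => matching_routes) []

-- ===== PRECONDITION & SPEC =====
def Spec_find_bus_route (routes : List (List (String × String))) (start_location : String) (end_location : String) (out : List (List (String × String))) : Prop := out = find_bus_route_alt routes start_location end_location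
instance (routes : List (List (String × String))) (start_location : String) (end_location : String) (out : List (List (String × String))) : Decidable (Spec_find_bus_route routes start_location end_location out) := by unfold Spec_find_bus_route; infer_instance

-- ===== CLAIM (what is proved, stated in full; the proofs are below) =====
def Claim_equal_find_bus_route : Prop := ∀ (routes : List (List (String × String))) (start_location : String) (end_location : String), Dom_find_bus_route routes start_location end_location → Spec_find_bus_route routes start_location end_location (find_bus_route routes start_location end_location)

-- ===== LEMMAS AND PROOFS =====

-- ===== VERDICT (by name: the statement is the Claim_ definition above) =====
lemma aFindEnd_cons_succ (x : String × String) (xs : List (String × String)) (e : String) (i : Nat) :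
    aFindEnd (x :: xs) e (i+1) = (aFindEnd xs e i).map (·+1) := by
  fun_induction aFindEnd xs e i with
  | case1 j h heq => rw [aFindEnd]; simp_all
  | case2 j h heq ih =>
      rw [aFindEnd]; simp only [List.length_cons]
      rw [dif_pos (by omega)]
      simpa [heq] using ih
  | case3 j h => rw [aFindEnd, aFindEnd]; simp_all

lemma bCollect_eq (e : String) (xs : List (String × String)) (acc : List (String × String)) :
    bCollect e acc xs =
      match aFindEnd xs e 0 with
      | none => none
      | some ei => some (acc ++ xs.take (ei+1)) := by
  induction xs generalizing acc with
  | nil => rw [aFindEnd]; simp [bCollect]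
  | cons x xs ih =>
      rw [bCollect, aFindEnd]
      simp only [List.length_cons, Nat.zero_lt_succ, dif_pos, List.getElem_cons_zero]
      by_cases hx : x.2 == e
      · simp [hx]
      · simp only [hx, if_neg, Bool.false_eq_true, not_false_eq_true,
          aFindEnd_cons_succ x xs e 0, ih]
        cases aFindEnd xs e 0 <;> simp

lemma route_eq (s e : String) (route : List (String × String)) :
    aRoute route s e = bSeek s e route := by
  induction route with
  | nil => simp [aRoute, bSeek, List.findIdx?_nil]
  | cons x xs ih =>
      rw [aRoute, bSeek, List.findIdx?_cons]
      by_cases hx : x.1 == s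
      · simp only [hx, if_pos]
        rw [aFindEnd]
        simp only [List.length_cons, Nat.zero_lt_succ, dif_pos, List.getElem_cons_zero]
        by_cases he : x.2 == e
        · simp only [he, if_pos]
          have h01 : ((0 : Nat) : Int) + 1 = ((1 : Nat) : Int) := by norm_num
          rw [h01, PySem.List.slice_natCast]
          simp
        · simp only [he, Bool.false_eq_true, if_neg, not_false_eq_true,
            aFindEnd_cons_succ x xs e 0, bCollect_eq]
          cases hfe : aFindEnd xs e 0 with
          | none => simp
          | some ei =>
              simp only [Option.map_some]
              have : ((ei + 1 : Nat) : Int) + 1 = (((ei + 2 : Nat) : Nat) : Int) := by push_cast; ring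
              rw [this, PySem.List.slice_natCast]
              have hc : ei + 2 - 0 = ei + 1 + 1 := by omega
              rw [hc]
              simp [List.take_succ_cons]
      · simp only [hx, Bool.false_eq_true, if_neg, not_false_eq_true]
        rw [← ih, aRoute]
        cases hfi : List.findIdx? (fun r => r.1 == s) xs with
        | none => simp
        | some si =>
            simp only [Option.map_some]
            rw [aFindEnd_cons_succ]
            cases hfe : aFindEnd xs e si with
            | none => simp
            | some ei =>
                simp only [Option.map_some]
                have h2 : ((ei + 1 : Nat) : Int) + 1 = (((ei + 2 : Nat)) : Int) := by push_cast; ring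
                have h3 : ((ei : Int) + 1) = ((ei + 1 : Nat) : Int) := by push_cast; ring
                rw [h2, h3, PySem.List.slice_natCast, PySem.List.slice_natCast]
                simp only [List.drop_succ_cons]
                have hc : ei + 2 - (si + 1) = ei + 1 - si := by omega
                rw [hc]

-- ===== VERDICT (by name: the statement is the Claim_ definition above) =====
theorem find_bus_route_spec : Claim_equal_find_bus_route := by
  intro routes s e _
  unfold Spec_find_bus_route find_bus_route find_bus_route_alt
  simp only [route_eq]
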